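-- pv_equiv track=rewrite | github.com/Guillen00/Python_Exercises | Python/4.forme1.py | formeAux
-- ===== SOURCE A (Python) =====
-- def formeAux(x,t):
--     y=x[t]
--     res=''
--     if(t==len(x)-1):
--         if(int(y)==1):
--             res=res+'1'
--
--             return res
--         else:
--
--             return res
--     if(int(y)==1):
--
--         res=res+'1'
--
--         return res+ formeAux(x,t+1)
--     else:
--         return res+ formeAux(x,t+1)
-- ===== SOURCE B (Python) =====
-- def formeAux(x, t):
--     cnt = (int(x[t]) == 1) + sum(int(x[i]) == 1 for i in range(t + 1, len(x)))
--     return '1' * cnt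
-- ===== Notes on version B (the rewrite author's own statement) =====
-- stated objective: simpler
-- what changed: Replaced A's branch-heavy recursion building the result by repeated string concatenation with counting: test int(x[t])==1, count the remaining matches over range(t+1, len(x)), and replicate '1' that many times.
import Mathlib
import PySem

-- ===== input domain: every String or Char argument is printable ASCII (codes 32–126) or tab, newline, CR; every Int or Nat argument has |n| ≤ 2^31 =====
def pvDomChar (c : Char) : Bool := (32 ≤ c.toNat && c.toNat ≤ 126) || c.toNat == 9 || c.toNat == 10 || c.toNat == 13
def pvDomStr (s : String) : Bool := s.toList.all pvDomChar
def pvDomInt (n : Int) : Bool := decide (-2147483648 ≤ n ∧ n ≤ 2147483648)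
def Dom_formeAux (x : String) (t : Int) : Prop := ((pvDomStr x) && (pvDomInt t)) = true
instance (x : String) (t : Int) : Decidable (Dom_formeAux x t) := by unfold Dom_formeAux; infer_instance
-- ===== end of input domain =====

-- B replaces A's recursion with a count — int(x[t])==1 plus the matches over range(t+1, len(x)) — and one replication of '1'.


-- ===== PORT A =====
-- A's recursion, on the code-point list. 'fuel' is only a totality guard (2*len+1 always suffices
-- for an in-range start index, since t ≥ -len and the recursion stops at len-1); pyGet? = none is
-- Python's IndexError and a non-digit y makes int(y) raise ValueError — both excluded by Pre_.
def formeAuxA (s : List Char) (fuel : Nat) (t : Int) : List Char :=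
  match PySem.List.pyGet? s t with
  | none => []                                   -- Python raises IndexError here (outside Pre_)
  | some y =>
    if t = (s.length : Int) - 1 then
      if PySem.Int.ofChars? [y] = some 1 then ['1'] else []
    else
      match fuel with
      | 0 => []                                  -- unreachable with the fuel given below
      | fuel + 1 =>
        if PySem.Int.ofChars? [y] = some 1 then '1' :: formeAuxA s fuel (t + 1)
        else formeAuxA s fuel (t + 1)

def formeAux (x : String) (t : Int) : String :=
  String.ofList (formeAuxA x.toList (2 * x.toList.length + 1) t)

-- ===== PORT B =====
-- B: cnt = (int(x[t]) == 1) + the number of i in range(t+1, len(x)) with int(x[i]) == 1; '1' * cnt.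
-- The first term indexes x[t] (pyGet? none = IndexError, outside Pre_), as Source B does.
def formeAux_alt (x : String) (t : Int) : String :=
  let s := x.toList
  let first : Nat :=
    if (PySem.List.pyGet? s t).bind (fun y => PySem.Int.ofChars? [y]) = some 1 then 1 else 0
  let rest : Nat := ((PySem.List.pyRange (t + 1) (s.length : Int) 1).filter
      (fun i => (PySem.List.pyGet? s i).bind (fun y => PySem.Int.ofChars? [y]) = some 1)).length
  String.ofList (List.replicate (first + rest) '1')

-- ===== PRECONDITION & SPEC =====
-- Pre_ = exactly where Python A returns: index t in range (negative t wraps from the end) and every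
-- character the recursion visits is a digit (else int(y) raises ValueError); for negative t the
-- scan wraps through the whole string, so then all of it must be digits.
def Pre_formeAux (x : String) (t : Int) : Prop :=
  PySem.Raise.InRange x.toList.length t ∧
  ((if 0 ≤ t then x.toList.drop t.toNat else x.toList).all
    (fun c => 48 ≤ c.toNat && c.toNat ≤ 57)) = true
instance (x : String) (t : Int) : Decidable (Pre_formeAux x t) := by unfold Pre_formeAux; infer_instance

def pvWitness_formeAux : String × Int := ("101", 0)

def Spec_formeAux (x : String) (t : Int) (out : String) : Prop := out = formeAux_alt x t
instance (x : String) (t : Int) (out : String) : Decidable (Spec_formeAux x t out) := by unfold Spec_formeAux; infer_instance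

-- ===== CLAIM =====
def Claim_equal_formeAux : Prop := ∀ (x : String) (t : Int), Dom_formeAux x t → Pre_formeAux x t → Spec_formeAux x t (formeAux x t)

-- ===== LEMMAS AND PROOFS =====

-- The visited-index condition B filters on.
def pvCond (s : List Char) (i : Int) : Bool :=
  decide ((PySem.List.pyGet? s i).bind (fun y => PySem.Int.ofChars? [y]) = some 1)

-- Key lemma: for an in-range start index t with enough fuel, A's recursion from t produces exactly
-- one '1' per index i in range(t, len s) whose character int-converts to 1 — i.e. the replicate of
-- B's filter count. Induction on k = (len-1) - t.
theorem formeAuxA_count (s : List Char) :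
    ∀ (k fuel : Nat) (t : Int), -(s.length : Int) ≤ t → t = (s.length : Int) - 1 - k → k ≤ fuel →
      formeAuxA s fuel t =
        List.replicate ((PySem.List.pyRange t (s.length : Int) 1).filter (pvCond s)).length '1' := by
  intro k
  induction k with
  | zero =>
    intro fuel t hlo ht _
    have hget : ∃ y, PySem.List.pyGet? s t = some y := by
      have hin : PySem.Raise.InRange s.length t := by
        simp [PySem.Raise.InRange]; omega
      cases hg : PySem.List.pyGet? s t with
      | none => exact absurd ((PySem.List.pyGet?_eq_none_iff s t).mp hg) (by simpa using hin)
      | some y => exact ⟨y, rfl⟩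
    rcases hget with ⟨y, hy⟩
    have hr : PySem.List.pyRange t (s.length : Int) 1 = [t] := by
      have : (s.length : Int) = t + 1 := by omega
      rw [this]; exact PySem.List.pyRange_one_singleton t
    have ht' : t = (s.length : Int) - 1 := by omega
    unfold formeAuxA
    simp only [hy, hr]
    rw [if_pos ht']
    by_cases hc : PySem.Int.ofChars? [y] = some 1 <;>
      simp [hc, List.filter, pvCond, hy]
  | succ k ih =>
    intro fuel t hlo ht hfuel
    have hget : ∃ y, PySem.List.pyGet? s t = some y := by
      have hin : PySem.Raise.InRange s.length t := by
        simp [PySem.Raise.InRange]; omega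
      cases hg : PySem.List.pyGet? s t with
      | none => exact absurd ((PySem.List.pyGet?_eq_none_iff s t).mp hg) (by simpa using hin)
      | some y => exact ⟨y, rfl⟩
    rcases hget with ⟨y, hy⟩
    obtain ⟨fuel, rfl⟩ : ∃ f, fuel = f + 1 := ⟨fuel - 1, by omega⟩
    have hne : t ≠ (s.length : Int) - 1 := by omega
    have hr : PySem.List.pyRange t (s.length : Int) 1 = t :: PySem.List.pyRange (t + 1) (s.length : Int) 1 :=
      PySem.List.pyRange_one_cons (by omega)
    have ihx := ih fuel (t + 1) (by omega) (by omega) (by omega)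
    unfold formeAuxA
    simp only [hy, hr]
    rw [if_neg hne]
    by_cases hc : PySem.Int.ofChars? [y] = some 1 <;>
      simp [hc, List.filter, pvCond, hy, ihx, List.replicate]

-- ===== VERDICT =====
theorem formeAux_spec : Claim_equal_formeAux := by
  intro x t _ hpre
  obtain ⟨hin, -⟩ := hpre
  have hin' : -(x.toList.length : Int) ≤ t ∧ t < (x.toList.length : Int) := by
    simpa [PySem.Raise.InRange] using hin
  unfold Spec_formeAux formeAux formeAux_alt
  rw [formeAuxA_count x.toList ((x.toList.length : Int) - 1 - t).toNat _ t hin'.1 (by omega) (by omega)]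
  have hcons : PySem.List.pyRange t (x.toList.length : Int) 1
      = t :: PySem.List.pyRange (t + 1) (x.toList.length : Int) 1 :=
    PySem.List.pyRange_one_cons (by omega)
  have hfil : ∀ l : List Int,
      List.filter (fun i => decide (((PySem.List.pyGet? x.toList i).bind fun y => PySem.Int.ofChars? [y]) = some 1)) l
        = List.filter (pvCond x.toList) l := fun l => rfl
  simp only [hfil]
  rw [hcons, List.filter_cons]
  by_cases hc : ((PySem.List.pyGet? x.toList t).bind fun y => PySem.Int.ofChars? [y]) = some 1
  · simp [pvCond, hc, Nat.add_comm]
  · simp [pvCond, hc]
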